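-- pv_equiv track=rewrite | github.com/snahammond/MscProjects | Advanced Algorithms/FinalProject.py | makeAwiredGraphInEdgeListFormat
-- ===== SOURCE A (Python) =====
-- def makeAwiredGraphInEdgeListFormat(m0):
--  graphInEdgeListFormat = []
--  linksCounter=0
--  for x in list(range(m0)):
--   for y in list(range(x,m0)):
--    if x != y and linksCounter < m0:
--     linksCounter=linksCounter+1
--     graphInEdgeListFormat.append([x,y])
--
--  return graphInEdgeListFormat
-- ===== SOURCE B (Python) =====
-- def makeAwiredGraphInEdgeListFormat(m0):
--     # Closed form: the first m0 pairs x<y in lexicographic order are row 0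
--     # ([0,1]..[0,m0-1], m0-1 pairs) plus [1,2] when m0 >= 3.
--     edges = [[0, y] for y in range(1, m0)]
--     if m0 >= 3:
--         edges.append([1, 2])
--     return edges
-- ===== Notes on version B (the rewrite author's own statement) =====
-- stated objective: faster
-- what changed: Replaces the nested x,y scan with a capped counter by the closed form: the first m0 lexicographic pairs are row 0 ([0,y] for y in 1..m0-1) plus [1,2] when m0 >= 3.
import Mathlib
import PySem

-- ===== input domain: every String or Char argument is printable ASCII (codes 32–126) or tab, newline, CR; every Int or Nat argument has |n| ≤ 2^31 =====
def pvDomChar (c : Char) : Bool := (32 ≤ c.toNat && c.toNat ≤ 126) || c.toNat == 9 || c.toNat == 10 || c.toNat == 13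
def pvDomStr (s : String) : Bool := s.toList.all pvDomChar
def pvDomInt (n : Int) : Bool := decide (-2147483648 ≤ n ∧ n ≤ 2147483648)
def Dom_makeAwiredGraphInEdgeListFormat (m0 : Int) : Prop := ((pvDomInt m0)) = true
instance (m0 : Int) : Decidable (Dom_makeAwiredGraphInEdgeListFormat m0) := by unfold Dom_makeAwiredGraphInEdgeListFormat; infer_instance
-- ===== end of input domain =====

-- B replaces A's O(m0^2) nested scan (capped at m0 appends) with the O(m0) closed form:
-- all of row 0 ([0,1]..[0,m0-1]) plus [1,2] when m0 >= 3.


-- ===== PORT A =====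
-- inner 'for y in list(range(x, m0))' loop on the state (edges, linksCounter)
def pvInnerA (m0 x : Int) (s : List (List Int) × Int) : List (List Int) × Int :=
  (PySem.List.pyRange x m0 1).foldl
    (fun s y => if x ≠ y ∧ s.2 < m0 then (s.1 ++ [[x, y]], s.2 + 1) else s) s

def makeAwiredGraphInEdgeListFormat (m0 : Int) : List (List Int) :=
  ((PySem.List.pyRange 0 m0 1).foldl (fun s x => pvInnerA m0 x s)
    (([] : List (List Int)), (0 : Int))).1

-- ===== PORT B =====
def makeAwiredGraphInEdgeListFormat_alt (m0 : Int) : List (List Int) :=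
  let edges := (PySem.List.pyRange 1 m0 1).map (fun y => [0, y])
  if 3 ≤ m0 then edges ++ [[1, 2]] else edges

-- ===== PRECONDITION & SPEC =====
def Spec_makeAwiredGraphInEdgeListFormat (m0 : Int) (out : List (List Int)) : Prop := out = makeAwiredGraphInEdgeListFormat_alt m0
instance (m0 : Int) (out : List (List Int)) : Decidable (Spec_makeAwiredGraphInEdgeListFormat m0 out) := by unfold Spec_makeAwiredGraphInEdgeListFormat; infer_instance

-- ===== CLAIM (what is proved, stated in full; the proofs are below) =====
def Claim_equal_makeAwiredGraphInEdgeListFormat : Prop := ∀ (m0 : Int), Dom_makeAwiredGraphInEdgeListFormat m0 → Spec_makeAwiredGraphInEdgeListFormat m0 (makeAwiredGraphInEdgeListFormat m0)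

-- ===== LEMMAS AND PROOFS =====

-- once the counter has reached m0, the inner loop body is the identity
theorem pv_fold_stop (m0 x : Int) : ∀ (l : List Int) (es : List (List Int)) (c : Int), m0 ≤ c →
    l.foldl (fun s y => if x ≠ y ∧ s.2 < m0 then (s.1 ++ [[x, y]], s.2 + 1) else s) (es, c) = (es, c) := by
  intro l
  induction l with
  | nil => intro es c _; rfl
  | cons y t ih =>
      intro es c h
      simp only [List.foldl_cons]
      rw [if_neg (by simp; omega)]
      exact ih es c h

theorem pvInnerA_stop (m0 x : Int) (es : List (List Int)) (c : Int) (h : m0 ≤ c) :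
    pvInnerA m0 x (es, c) = (es, c) :=
  pv_fold_stop m0 x _ es c h

theorem pv_outer_stop (m0 : Int) : ∀ (l : List Int) (es : List (List Int)) (c : Int), m0 ≤ c →
    l.foldl (fun s x => pvInnerA m0 x s) (es, c) = (es, c) := by
  intro l
  induction l with
  | nil => intro es c _; rfl
  | cons x t ih =>
      intro es c h
      simp only [List.foldl_cons, pvInnerA_stop m0 x es c h]
      exact ih es c h

-- general run of the inner loop over a list of y's all distinct from x
theorem pv_fold_run (m0 x : Int) : ∀ (l : List Int) (es : List (List Int)) (c : Int),
    (∀ y ∈ l, y ≠ x) →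
    l.foldl (fun s y => if x ≠ y ∧ s.2 < m0 then (s.1 ++ [[x, y]], s.2 + 1) else s) (es, c)
      = (es ++ (l.take (m0 - c).toNat).map (fun y => [x, y]),
         c + min (l.length : Int) (max (m0 - c) 0)) := by
  intro l
  induction l with
  | nil => intro es c _; simp
  | cons y t ih =>
      intro es c hne
      simp only [List.foldl_cons]
      by_cases hc : c < m0
      · rw [if_pos ⟨(fun h => hne y (by simp) h.symm), hc⟩]
        rw [ih (es ++ [[x, y]]) (c + 1) (fun z hz => hne z (by simp [hz]))]
        have h1 : (m0 - c).toNat = (m0 - (c + 1)).toNat + 1 := by omega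
        have h2 : (c + 1) + min (t.length : Int) (max (m0 - (c + 1)) 0)
            = c + min ((y :: t).length : Int) (max (m0 - c) 0) := by
          simp only [List.length_cons]; push_cast; omega
        rw [h1, h2]
        simp
      · rw [if_neg (by simp; omega)]
        rw [pv_fold_stop m0 x t es c (by omega)]
        have h1 : (m0 - c).toNat = 0 := by omega
        have h2 : c + min ((y :: t).length : Int) (max (m0 - c) 0) = c := by
          simp only [List.length_cons]; push_cast; omega
        rw [h1, h2]; simp

-- the inner loop for a row x < m0: skip y = x, then run over range(x+1, m0)
theorem pvInnerA_run (m0 x : Int) (hx : x < m0) (es : List (List Int)) (c : Int) :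
    pvInnerA m0 x (es, c)
      = (es ++ ((PySem.List.pyRange (x + 1) m0 1).take (m0 - c).toNat).map (fun y => [x, y]),
         c + min ((m0 - (x + 1)).toNat : Int) (max (m0 - c) 0)) := by
  unfold pvInnerA
  rw [PySem.List.pyRange_one_cons hx]
  simp only [List.foldl_cons]
  rw [if_neg (fun h => h.1 rfl)]
  rw [pv_fold_run m0 x _ es c
      (fun y hy => by have := (PySem.List.mem_pyRange_one.mp hy).1; omega)]
  rw [PySem.List.length_pyRange_one]

theorem makeAwiredGraphInEdgeListFormat_spec' (m0 : Int) :
    makeAwiredGraphInEdgeListFormat m0 = makeAwiredGraphInEdgeListFormat_alt m0 := by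
  rcases lt_trichotomy m0 1 with h | h | h
  · -- m0 ≤ 0 : both ranges empty
    unfold makeAwiredGraphInEdgeListFormat makeAwiredGraphInEdgeListFormat_alt
    rw [PySem.List.pyRange_one_eq_nil (by omega), PySem.List.pyRange_one_eq_nil (by omega)]
    simp; omega
  · subst h; decide
  · rcases eq_or_lt_of_le (by omega : (2 : Int) ≤ m0) with h2 | h3
    · rw [← h2]; decide
    · -- m0 ≥ 3
      unfold makeAwiredGraphInEdgeListFormat
      rw [PySem.List.pyRange_one_cons (by omega : (0:Int) < m0)]
      simp only [zero_add]
      rw [PySem.List.pyRange_one_cons (by omega : (1:Int) < m0)]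
      simp only [List.foldl_cons]
      rw [pvInnerA_run m0 0 (by omega)]
      simp only [zero_add]
      have hlen : ((PySem.List.pyRange 1 m0 1).take (m0 - 0).toNat)
          = PySem.List.pyRange 1 m0 1 :=
        List.take_of_length_le (by rw [PySem.List.length_pyRange_one]; omega)
      rw [hlen]
      have hc1 : min (((m0 - 1).toNat : Int)) (max (m0 - 0) 0) = m0 - 1 := by
        omega
      rw [hc1]
      rw [pvInnerA_run m0 1 (by omega)]
      have htake : ((PySem.List.pyRange (1 + 1) m0 1).take (m0 - (m0 - 1)).toNat) = [2] := by
        have : m0 - (m0 - 1) = 1 := by omega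
        rw [this]
        rw [show ((1 : Int) + 1) = 2 by norm_num, PySem.List.pyRange_one_cons (by omega : (2:Int) < m0)]
        rfl
      rw [htake]
      have hc2 : (m0 - 1) + min (((m0 - (1 + 1)).toNat : Int)) (max (m0 - (m0 - 1)) 0) = m0 := by
        omega
      rw [hc2]
      rw [pv_outer_stop m0 _ _ m0 le_rfl]
      unfold makeAwiredGraphInEdgeListFormat_alt
      rw [if_pos (by omega)]
      simp

-- ===== VERDICT (by name: the statement is the Claim_ definition above) =====
theorem makeAwiredGraphInEdgeListFormat_spec : Claim_equal_makeAwiredGraphInEdgeListFormat := by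
  intro m0 _
  exact makeAwiredGraphInEdgeListFormat_spec' m0
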